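-- pv_equiv track=rewrite | github.com/enaipi/direct-Poisson-neural-networks | plot_compare.py | split_data_to_forward_paths
-- ===== SOURCE A (Python) =====
-- def split_data_to_forward_paths(xs, ys):
--     """
--     The function split_data_to_forward_paths takes two lists, xs and ys, and splits the data into
--     forward paths based on the values in xs.
--
--     :param xs: A list of time values. Each value represents a time point in a sequence
--     :param ys: The `ys` parameter represents a list of values. It is assumed that each value in `ys` corresponds to a specific time point
--     :return: a list of lists, where each inner list represents a forward path. Each inner list contains the corresponding values from the `ys` list that belong to that forward path.
--     """
--     if len(xs) != len(ys):
--         raise Exception("Length of xs and ys not equal.")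
--     paths = [[ys[0]]]
--     for i in range(1,len(xs)):
--         if xs[i] < xs[i-1]: #return to time zero, new path
--             paths.append([ys[i]])
--         else:
--             paths[len(paths)-1].append(ys[i]) #add value to the current path
--     return paths
-- ===== SOURCE B (Python) =====
-- def split_data_to_forward_paths(xs, ys):
--     if len(xs) != len(ys):
--         raise Exception("Length of xs and ys not equal.")
--     bounds = [0]
--     for i in range(1, len(xs)):
--         if xs[i] < xs[i-1]:
--             bounds.append(i)
--     bounds.append(len(xs))
--     return [ys[a:b] for a, b in zip(bounds, bounds[1:])]
-- ===== Notes on version B (the rewrite author's own statement) =====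
-- stated objective: alternative
-- what changed: B first collects boundary indices where xs decreases, then constructs all paths at once by slicing ys between consecutive boundaries, instead of growing and mutating a list of paths element by element.
import Mathlib
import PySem

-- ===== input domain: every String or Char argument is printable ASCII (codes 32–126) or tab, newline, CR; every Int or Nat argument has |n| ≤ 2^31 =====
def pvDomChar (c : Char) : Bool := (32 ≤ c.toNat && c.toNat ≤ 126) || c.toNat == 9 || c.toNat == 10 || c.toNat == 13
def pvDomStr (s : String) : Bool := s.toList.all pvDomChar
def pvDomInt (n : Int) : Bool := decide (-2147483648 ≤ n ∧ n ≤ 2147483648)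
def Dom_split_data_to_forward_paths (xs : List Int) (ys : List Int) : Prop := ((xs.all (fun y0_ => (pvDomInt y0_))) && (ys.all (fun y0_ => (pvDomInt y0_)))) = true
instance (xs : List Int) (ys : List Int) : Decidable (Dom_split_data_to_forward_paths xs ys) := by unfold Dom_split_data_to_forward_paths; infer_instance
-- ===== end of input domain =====

-- B builds the list of boundary indices (where xs decreases) first and then slices ys
-- between consecutive boundaries; return values agree with A wherever A returns.

-- ===== PORT A =====
def split_data_to_forward_paths (xs : List Int) (ys : List Int) : List (List Int) :=
  if xs.length ≠ ys.length then []   -- Python raises Exception here (outside Pre_)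
  else
    -- paths = [[ys[0]]]; for i in range(1, len(xs)): …
    (PySem.List.pyRange 1 xs.length 1).foldl
      (fun paths i =>
        if PySem.List.pyGetD xs i 0 < PySem.List.pyGetD xs (i-1) 0 then
          paths ++ [[PySem.List.pyGetD ys i 0]]
        else
          -- paths[len(paths)-1].append(ys[i]): replace the last path in place
          paths.dropLast ++ [paths.getLastD [] ++ [PySem.List.pyGetD ys i 0]])
      [[PySem.List.pyGetD ys 0 0]]

-- ===== PORT B =====
def split_data_to_forward_paths_alt (xs : List Int) (ys : List Int) : List (List Int) :=
  if xs.length ≠ ys.length then []   -- Python raises Exception here (outside Pre_)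
  else
    let bounds : List Int :=
      ((PySem.List.pyRange 1 xs.length 1).foldl
        (fun bs i =>
          if PySem.List.pyGetD xs i 0 < PySem.List.pyGetD xs (i-1) 0 then bs ++ [i] else bs)
        [0]) ++ [(xs.length : Int)]
    -- [ys[a:b] for a, b in zip(bounds, bounds[1:])]
    (bounds.zip bounds.tail).map (fun p => PySem.List.slice ys (some p.1) (some p.2))

-- ===== PRECONDITION & SPEC =====
-- Pre_ excludes length-mismatched inputs (A raises Exception) and empty xs (A evaluates
-- ys[0] and raises IndexError); A returns no value on either.
def Pre_split_data_to_forward_paths (xs : List Int) (ys : List Int) : Prop :=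
  xs.length = ys.length ∧ xs ≠ []
instance (xs : List Int) (ys : List Int) : Decidable (Pre_split_data_to_forward_paths xs ys) := by
  unfold Pre_split_data_to_forward_paths; infer_instance

def pvWitness_split_data_to_forward_paths : List Int × List Int := ([1, 2, 1], [10, 20, 30])

def Spec_split_data_to_forward_paths (xs : List Int) (ys : List Int) (out : List (List Int)) : Prop := out = split_data_to_forward_paths_alt xs ys
instance (xs : List Int) (ys : List Int) (out : List (List Int)) : Decidable (Spec_split_data_to_forward_paths xs ys out) := by unfold Spec_split_data_to_forward_paths; infer_instance

-- ===== CLAIM (what is proved, stated in full; the proofs are below) =====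
def Claim_equal_split_data_to_forward_paths : Prop := ∀ (xs : List Int) (ys : List Int), Dom_split_data_to_forward_paths xs ys → Pre_split_data_to_forward_paths xs ys → Spec_split_data_to_forward_paths xs ys (split_data_to_forward_paths xs ys)

-- ===== LEMMAS AND PROOFS =====

-- recursive characterisation of B's zip-with-tail slicing
def pvSegs (ys : List Int) : List Int → List (List Int)
  | a :: b :: rest => PySem.List.slice ys (some a) (some b) :: pvSegs ys (b :: rest)
  | _ => []

theorem pvSegs_eq_zip (ys : List Int) (bl : List Int) :
    (bl.zip bl.tail).map (fun p => PySem.List.slice ys (some p.1) (some p.2)) = pvSegs ys bl := by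
  induction bl with
  | nil => simp [pvSegs]
  | cons a t ih =>
    cases t with
    | nil => simp [pvSegs]
    | cons b r => simpa [pvSegs] using ih

theorem pvSegs_snoc (ys : List Int) (bl : List Int) (a b : Int) :
    pvSegs ys (bl ++ [a, b]) = pvSegs ys (bl ++ [a]) ++ [PySem.List.slice ys (some a) (some b)] := by
  induction bl with
  | nil => simp [pvSegs]
  | cons c t ih =>
    cases t with
    | nil => simp [pvSegs]
    | cons d r => simpa [pvSegs] using ih

-- slice extension by one element: ys[a:i] ++ [ys[i]] = ys[a:i+1]
theorem pv_slice_ext (ys : List Int) (a : Int) (i : Nat) (ha : 0 ≤ a) (hai : a ≤ (i : Int))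
    (hi : i < ys.length) :
    PySem.List.slice ys (some a) (some (i : Int)) ++ [ys.getD i 0] =
      PySem.List.slice ys (some a) (some ((i : Int) + 1)) := by
  rw [PySem.List.slice_toNat ys ha (by omega : (0:Int) ≤ (i:Int)),
      PySem.List.slice_toNat ys ha (by omega : (0:Int) ≤ (i:Int)+1)]
  have h1 : ((i:Int)).toNat = i := by omega
  have h2 : (((i:Int)+1)).toNat = i + 1 := by omega
  rw [h1, h2]
  have hlt : i - a.toNat < (ys.drop a.toNat).length := by
    simp only [List.length_drop]; omega
  have hgd : ys.getD i 0 = (ys.drop a.toNat)[i - a.toNat] := by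
    rw [List.getElem_drop, List.getD_eq_getElem ys 0 hi]
    congr 1; omega
  rw [hgd, show i + 1 - a.toNat = (i - a.toNat) + 1 by omega]
  simpa using List.take_concat_get hlt

-- the single-element slice ys[i:i+1] = [ys[i]]
theorem pv_slice_single (ys : List Int) (i : Nat) (hi : i < ys.length) :
    PySem.List.slice ys (some (i : Int)) (some ((i : Int) + 1)) = [ys.getD i 0] := by
  have := pv_slice_ext ys (i : Int) i (by omega) (by omega) hi
  rw [← this]
  rw [PySem.List.slice_toNat ys (by omega : (0:Int) ≤ (i:Int)) (by omega : (0:Int) ≤ (i:Int))]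
  simp

-- the loop invariant: after processing indices 1..m-1, A's paths equal B's slices of ys
theorem pv_inv (xs ys : List Int) (hlen : xs.length = ys.length) :
    ∀ m : Nat, 1 ≤ m → m ≤ xs.length →
    ∃ (bs : List Int) (l : Int),
      (PySem.List.pyRange 1 (m : Int) 1).foldl
          (fun bs i =>
            if PySem.List.pyGetD xs i 0 < PySem.List.pyGetD xs (i-1) 0 then bs ++ [i] else bs)
          [0] = bs ++ [l] ∧ 0 ≤ l ∧ l < (m : Int) ∧
      (PySem.List.pyRange 1 (m : Int) 1).foldl
          (fun paths i =>
            if PySem.List.pyGetD xs i 0 < PySem.List.pyGetD xs (i-1) 0 then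
              paths ++ [[PySem.List.pyGetD ys i 0]]
            else
              paths.dropLast ++ [paths.getLastD [] ++ [PySem.List.pyGetD ys i 0]])
          [[PySem.List.pyGetD ys 0 0]] = pvSegs ys ((bs ++ [l]) ++ [(m : Int)]) := by
  intro m
  induction m with
  | zero => omega
  | succ m ih =>
    intro _ hm1
    by_cases hm : 1 ≤ m
    · -- inductive step: one more loop iteration with i = m
      obtain ⟨bs, l, hB, hl0, hlm, hA⟩ := ih hm (by omega)
      have hsplit : PySem.List.pyRange 1 ((m + 1 : Nat) : Int) 1 =
          PySem.List.pyRange 1 (m : Int) 1 ++ [(m : Int)] := by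
        push_cast
        exact PySem.List.pyRange_one_succ_right (by omega)
      rw [hsplit, List.foldl_append, List.foldl_append, hB, hA]
      simp only [List.foldl_cons, List.foldl_nil]
      have hmy : m < ys.length := by omega
      have hgy : PySem.List.pyGetD ys (m : Int) 0 = ys.getD m 0 := by
        simp [PySem.List.pyGetD_natCast]
      by_cases hc : PySem.List.pyGetD xs (m : Int) 0 < PySem.List.pyGetD xs ((m : Int) - 1) 0
      · refine ⟨bs ++ [l], (m : Int), ?_, by omega, by push_cast; omega, ?_⟩
        · rw [if_pos hc]
        · rw [if_pos hc, hgy]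
          have := pvSegs_snoc ys (bs ++ [l]) (m : Int) ((m : Int) + 1)
          rw [pv_slice_single ys m hmy] at this
          have harg : ((bs ++ [l]) ++ [(m : Int), (m : Int) + 1]) =
              (((bs ++ [l]) ++ [(m : Int)]) ++ [((m + 1 : Nat) : Int)]) := by
            push_cast; simp
          rw [harg] at this
          rw [this]
      · refine ⟨bs, l, ?_, hl0, by push_cast; omega, ?_⟩
        · rw [if_neg hc]
        · rw [if_neg hc, hgy]
          have e1 : bs ++ [l] ++ [(m : Int)] = bs ++ [l, (m : Int)] := by simp
          have e2 : bs ++ [l] ++ [((m + 1 : Nat) : Int)] = bs ++ [l, (m : Int) + 1] := by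
            push_cast; simp
          rw [e1, e2, pvSegs_snoc ys bs l (m : Int), pvSegs_snoc ys bs l ((m : Int) + 1),
              ← pv_slice_ext ys l m hl0 (by omega) hmy]
          simp
    · -- base case m = 0: the loop body has not yet run
      have hm0 : m = 0 := by omega
      subst hm0
      have hy : 0 < ys.length := by omega
      have hr : PySem.List.pyRange (1 : Int) ((0 + 1 : Nat) : Int) 1 = [] :=
        PySem.List.pyRange_one_eq_nil (by norm_num)
      rw [hr]
      refine ⟨[], 0, by simp, by omega, by norm_num, ?_⟩
      simp only [List.foldl_nil, List.nil_append, List.cons_append, pvSegs]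
      rw [PySem.List.slice_toNat ys (by omega) (by positivity)]
      cases ys with
      | nil => simp at hy
      | cons y t => simp [PySem.List.pyGetD_zero]

theorem split_data_to_forward_paths_spec : Claim_equal_split_data_to_forward_paths := by
  intro xs ys _ hpre
  obtain ⟨hlen, hne⟩ := hpre
  unfold Spec_split_data_to_forward_paths
  unfold split_data_to_forward_paths split_data_to_forward_paths_alt
  rw [if_neg (by omega : ¬ xs.length ≠ ys.length), if_neg (by omega : ¬ xs.length ≠ ys.length)]
  have h1 : 1 ≤ xs.length := by
    cases xs with
    | nil => exact absurd rfl hne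
    | cons a t => simp
  obtain ⟨bs, l, hB, _, _, hA⟩ := pv_inv xs ys hlen xs.length h1 le_rfl
  rw [pvSegs_eq_zip, hB, hA]
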